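-- pv_equiv track=rewrite | github.com/LJMarquez/nau-coding | CS-126L/lab_6/dna_partB.py | get_codons
-- ===== SOURCE A (Python) =====
-- def get_codons( nucleotide_string ):
--     codons_list = []
--     temp_codon = ""
--     for nucleotide_index in range(len(nucleotide_string)):
--         nucleotide = nucleotide_string[nucleotide_index]
--         if nucleotide != "-":
--             temp_codon += nucleotide
--             if len(temp_codon) == 3:
--                 codons_list.append(temp_codon)
--                 temp_codon = ""
--
--     return codons_list
-- ===== SOURCE B (Python) =====
-- def get_codons(nucleotide_string):
--     filtered = [ch for ch in nucleotide_string if ch != "-"]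
--     n = len(filtered) - len(filtered) % 3
--     return ["".join(filtered[i:i + 3]) for i in range(0, n, 3)]
-- ===== Notes on version B (the rewrite author's own statement) =====
-- stated objective: simpler
-- what changed: Replaces the fused loop with a running temp buffer and length==3 check by two separate phases: filter out dashes into a list, then stride-3 slice it, discarding the incomplete tail.
import Mathlib
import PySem

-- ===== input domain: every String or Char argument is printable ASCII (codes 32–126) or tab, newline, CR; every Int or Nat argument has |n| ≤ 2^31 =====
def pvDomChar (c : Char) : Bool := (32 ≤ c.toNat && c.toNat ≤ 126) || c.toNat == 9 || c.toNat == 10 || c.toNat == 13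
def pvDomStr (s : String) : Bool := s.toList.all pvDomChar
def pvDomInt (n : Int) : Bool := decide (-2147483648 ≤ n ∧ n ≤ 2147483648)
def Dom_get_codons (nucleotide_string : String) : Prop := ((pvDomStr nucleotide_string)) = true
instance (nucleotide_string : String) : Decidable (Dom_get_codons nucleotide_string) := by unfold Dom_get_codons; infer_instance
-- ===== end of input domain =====

-- B replaces A's fused loop (temp buffer + length==3 check) by a filter phase followed by a stride-3 slicing phase; objective: simpler.

-- ===== PORT A =====
-- temp_codon (a Python str of ASCII chars) is carried as its List Char; appending a char is ++ [ch] (exact).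
def getCodonsStep (st : List String × List Char) (ch : Char) : List String × List Char :=
  if ch ≠ '-' then
    let t := st.2 ++ [ch]
    if t.length = 3 then (st.1 ++ [String.mk t], []) else (st.1, t)
  else st

-- 'for nucleotide_index in range(len(s)): nucleotide = s[nucleotide_index]' visits the chars in order = foldl over toList (exact).
def get_codons (nucleotide_string : String) : List String :=
  (nucleotide_string.toList.foldl getCodonsStep ([], [])).1

-- ===== PORT B =====
def get_codons_alt (nucleotide_string : String) : List String :=
  let filtered := nucleotide_string.toList.filter (fun ch => ch ≠ '-')
  let n : Int := (filtered.length : Int) - (filtered.length : Int) % 3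
  (PySem.List.pyRange 0 n 3).map
    (fun i => String.mk (PySem.List.slice filtered (some i) (some (i + 3))))

-- ===== PRECONDITION & SPEC =====
def Spec_get_codons (nucleotide_string : String) (out : List String) : Prop := out = get_codons_alt nucleotide_string
instance (nucleotide_string : String) (out : List String) : Decidable (Spec_get_codons nucleotide_string out) := by unfold Spec_get_codons; infer_instance

-- ===== CLAIM (what is proved, stated in full; the proofs are below) =====
def Claim_equal_get_codons : Prop := ∀ (nucleotide_string : String), Dom_get_codons nucleotide_string → Spec_get_codons nucleotide_string (get_codons nucleotide_string)

-- ===== LEMMAS AND PROOFS =====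

-- common characterisation: greedy length-3 chunks of a (dash-free) char list
def chunk3 : List Char → List String
  | a :: b :: c :: rest => String.mk [a, b, c] :: chunk3 rest
  | _ => []

-- A's step ignores dashes, so folding over l equals folding over the dash-free sublist
theorem foldl_step_filter (l : List Char) (st : List String × List Char) :
    l.foldl getCodonsStep st = (l.filter (fun ch => ch ≠ '-')).foldl getCodonsStep st := by
  induction l generalizing st with
  | nil => rfl
  | cons a l ih =>
    by_cases ha : a = '-'
    · simp [ha, getCodonsStep, ih]
    · simp [ha, ih]

-- folding A's step over a dash-free list from an empty temp buffer yields the chunks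
theorem foldl_step_chunk3 (l : List Char) (acc : List String)
    (h : ∀ ch ∈ l, ch ≠ '-') :
    (l.foldl getCodonsStep (acc, [])).1 = acc ++ chunk3 l := by
  fun_induction chunk3 l generalizing acc with
  | case1 a b c rest ih =>
    have ha := h a (by simp); have hb := h b (by simp); have hc := h c (by simp)
    simp only [List.foldl_cons, getCodonsStep, ha, hb, hc, if_true, ne_eq,
      not_false_eq_true, List.nil_append, List.length_cons, List.length_nil]
    norm_num
    rw [ih (acc ++ [String.mk [a, b, c]]) (fun ch hch => h ch (by simp [hch]))]
    simp [List.append_assoc]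
  | case2 l h2 =>
    rcases l with _ | ⟨a, _ | ⟨b, _ | ⟨c, rest⟩⟩⟩
    · simp
    · have ha := h a (by simp)
      simp [getCodonsStep, ha]
    · have ha := h a (by simp); have hb := h b (by simp)
      simp [getCodonsStep, ha, hb]
    · exact absurd rfl (h2 a b c rest)

-- the stride-3 slicing phase also yields the chunks
theorem slice_chunk3 (t : List Char) :
    (PySem.List.pyRange 0 ((t.length : Int) - (t.length : Int) % 3) 3).map
      (fun i => String.mk (PySem.List.slice t (some i) (some (i + 3)))) = chunk3 t := by
  have key : ∀ (u : List Char),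
      (PySem.List.pyRange 0 ((u.length : Int) - (u.length : Int) % 3) 3).map
        (fun i => String.mk (PySem.List.slice u (some i) (some (i + 3))))
      = (List.range (u.length / 3)).map
        (fun j => String.mk ((u.drop (3 * j)).take 3)) := by
    intro u
    rw [PySem.List.pyRange_of_pos 0 _ (by norm_num : (0:Int) < 3)]
    have hcount : (if (0:Int) < (u.length : Int) - (u.length : Int) % 3 then
        (((u.length : Int) - (u.length : Int) % 3 - 0 + 3 - 1) / 3).toNat else 0)
        = u.length / 3 := by
      split_ifs with hpos <;> omega
    rw [hcount, List.map_map]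
    refine List.map_congr_left (fun j hj => ?_)
    simp only [Function.comp_apply, zero_add]
    have h3j : ((3:Int) * (j:Int)) = ((3 * j : Nat) : Int) := by push_cast; ring
    rw [h3j]
    have : ((3 * j : Nat) : Int) + 3 = ((3 * j : Nat) : Int) + ((3 : Nat) : Int) := by norm_num
    rw [this, PySem.List.slice_natCast_add]
  rw [key]
  fun_induction chunk3 t with
  | case1 a b c rest ih =>
    have hlen : (a :: b :: c :: rest).length / 3 = rest.length / 3 + 1 := by
      simp only [List.length_cons]; omega
    rw [hlen, List.range_succ_eq_map, List.map_cons, List.map_map]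
    refine congrArg₂ List.cons (by simp) ?_
    rw [← ih]
    refine List.map_congr_left (fun j hj => ?_)
    simp only [Function.comp_apply]
    have h1 : 3 * Nat.succ j = 3 * j + 3 := by omega
    have h2 : List.drop (3 * j + 3) (a :: b :: c :: rest) = List.drop (3 * j) rest :=
      List.drop_succ_cons
    rw [h1, h2]
  | case2 l h2 =>
    rcases l with _ | ⟨a, _ | ⟨b, _ | ⟨c, rest⟩⟩⟩
    · rfl
    · simp
    · simp
    · exact absurd rfl (h2 a b c rest)

-- ===== VERDICT (by name: the statement is the Claim_ definition above) =====
theorem get_codons_spec : Claim_equal_get_codons := by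
  intro s _
  unfold Spec_get_codons get_codons get_codons_alt
  rw [foldl_step_filter, foldl_step_chunk3 _ [] (by simp), slice_chunk3]
  simp
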